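-- pv_equiv track=rewrite | github.com/Milonahmed96/financial-research-agent | agent/nodes.py | parse_react_response
-- ===== SOURCE A (Python) =====
-- def parse_react_response(response: str) -> tuple[str, str, str]:
--     """
--     Parse Claude's ReAct response into (thought, action, action_input).
--     Returns empty strings if parsing fails.
--     """
--     thought = ""
--     action = ""
--     action_input = ""
--
--     for line in response.strip().split("\n"):
--         if line.startswith("Thought:"):
--             thought = line[len("Thought:"):].strip()
--         elif line.startswith("Action:"):
--             action = line[len("Action:"):].strip().lower()
--         elif line.startswith("Action Input:"):
--             action_input = line[len("Action Input:"):].strip()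
--
--     return thought, action, action_input
-- ===== SOURCE B (Python) =====
-- def parse_react_response(response: str) -> tuple[str, str, str]:
--     """Parse ReAct response into (thought, action, action_input):
--     for each field independently, take the LAST matching line (scan reversed)."""
--     lines = response.strip().split("\n")
--
--     def last(prefix: str) -> str:
--         for line in reversed(lines):
--             if line.startswith(prefix):
--                 return line[len(prefix):].strip()
--         return ""
--
--     return (last("Thought:"), last("Action:").lower(), last("Action Input:"))
-- ===== Notes on version B (the rewrite author's own statement) =====
-- stated objective: alternative
-- what changed: Replaces A's single forward pass that keeps overwriting three accumulators with three independent backward searches, each returning the first match of its prefix in the reversed line list (= A's last overwrite), defaulting to the empty string.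
import Mathlib
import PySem

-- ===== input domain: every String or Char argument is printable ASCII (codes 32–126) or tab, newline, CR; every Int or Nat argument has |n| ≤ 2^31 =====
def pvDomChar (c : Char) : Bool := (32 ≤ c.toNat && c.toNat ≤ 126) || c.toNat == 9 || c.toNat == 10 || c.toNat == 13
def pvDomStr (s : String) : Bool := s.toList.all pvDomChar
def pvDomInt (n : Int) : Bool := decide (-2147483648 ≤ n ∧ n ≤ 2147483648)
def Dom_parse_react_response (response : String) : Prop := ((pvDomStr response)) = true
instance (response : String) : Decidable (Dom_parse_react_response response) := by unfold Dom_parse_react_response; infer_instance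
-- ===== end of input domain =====

-- B replaces A's one forward pass with three accumulators by three independent
-- backward searches for the last matching line (objective: alternative decomposition).

-- ===== PORT A =====
-- the loop body: the if/elif/elif chain updating (thought, action, action_input)
def pvStepA (st : List Char × List Char × List Char) (line : List Char) :
    List Char × List Char × List Char :=
  if PySem.Chars.startswith line "Thought:".toList then
    (PySem.Chars.strip (PySem.Chars.slice line (some 8) none), st.2.1, st.2.2)
  else if PySem.Chars.startswith line "Action:".toList then
    (st.1, PySem.Chars.lower (PySem.Chars.strip (PySem.Chars.slice line (some 7) none)), st.2.2)
  else if PySem.Chars.startswith line "Action Input:".toList then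
    (st.1, st.2.1, PySem.Chars.strip (PySem.Chars.slice line (some 13) none))
  else st

def parse_react_response (response : String) : String × String × String :=
  let st := (PySem.Chars.splitOn (PySem.Chars.strip response.toList) "\n".toList).foldl
      pvStepA ([], [], [])
  (String.ofList st.1, String.ofList st.2.1, String.ofList st.2.2)

-- ===== PORT B =====
-- Source B's helper `last`: scan the (already reversed) lines, return the first match's
-- stripped tail (line[len(prefix):].strip()), default "".
def pvLastVal (pre : List Char) (n : Int) : List (List Char) → List Char
  | [] => []
  | l :: ls =>
    if PySem.Chars.startswith l pre then PySem.Chars.strip (PySem.Chars.slice l (some n) none)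
    else pvLastVal pre n ls

def parse_react_response_alt (response : String) : String × String × String :=
  let rlines := (PySem.Chars.splitOn (PySem.Chars.strip response.toList) "\n".toList).reverse
  (String.ofList (pvLastVal "Thought:".toList 8 rlines),
   String.ofList (PySem.Chars.lower (pvLastVal "Action:".toList 7 rlines)),
   String.ofList (pvLastVal "Action Input:".toList 13 rlines))

-- ===== PRECONDITION & SPEC =====
def Spec_parse_react_response (response : String) (out : String × String × String) : Prop := out = parse_react_response_alt response
instance (response : String) (out : String × String × String) : Decidable (Spec_parse_react_response response out) := by unfold Spec_parse_react_response; infer_instance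

-- ===== CLAIM (what is proved, stated in full; the proofs are below) =====
def Claim_equal_parse_react_response : Prop := ∀ (response : String), Dom_parse_react_response response → Spec_parse_react_response response (parse_react_response response)

-- ===== LEMMAS AND PROOFS =====

-- generic "value of the first match, else default" used to characterise A's fold
def pvLastD (p : List Char → Bool) (f : List Char → List Char) :
    List (List Char) → List Char → List Char
  | [], d => d
  | l :: ls, d => if p l then f l else pvLastD p f ls d

theorem pvLastD_append_singleton (p : List Char → Bool) (f : List Char → List Char)
    (xs : List (List Char)) (l : List Char) (d : List Char) :
    pvLastD p f (xs ++ [l]) d = pvLastD p f xs (if p l then f l else d) := by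
  induction xs with
  | nil => simp [pvLastD]
  | cons x xs ih => by_cases h : p x <;> simp [pvLastD, h, ih]

theorem pvLastVal_eq_lastD (pre : List Char) (n : Int) (xs : List (List Char)) :
    pvLastVal pre n xs =
      pvLastD (fun l => PySem.Chars.startswith l pre)
        (fun l => PySem.Chars.strip (PySem.Chars.slice l (some n) none)) xs [] := by
  induction xs with
  | nil => rfl
  | cons x xs ih => by_cases h : PySem.Chars.startswith x pre <;> simp [pvLastVal, pvLastD, h, ih]

theorem pvLower_lastD (p : List Char → Bool) (f : List Char → List Char)
    (xs : List (List Char)) (d : List Char) :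
    PySem.Chars.lower (pvLastD p f xs d) =
      pvLastD p (fun l => PySem.Chars.lower (f l)) xs (PySem.Chars.lower d) := by
  induction xs with
  | nil => rfl
  | cons x xs ih => by_cases h : p x <;> simp [pvLastD, h, ih]

-- a line cannot start with two of the three (pairwise incompatible) prefixes
theorem pvNotBoth (l p q : List Char) (hpq : ¬ p <+: q) (hqp : ¬ q <+: p)
    (hp : PySem.Chars.startswith l p = true) : PySem.Chars.startswith l q = false := by
  rw [PySem.Chars.startswith_iff] at hp
  by_contra h
  rw [Bool.not_eq_false, PySem.Chars.startswith_iff] at h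
  rcases List.prefix_or_prefix_of_prefix hp h with h' | h'
  · exact hpq h'
  · exact hqp h'

-- A's fold computes, in each component, the value of the LAST matching line
theorem pvFold_eq (lines : List (List Char)) :
    ∀ st : List Char × List Char × List Char,
    lines.foldl pvStepA st =
      (pvLastD (fun l => PySem.Chars.startswith l "Thought:".toList)
        (fun l => PySem.Chars.strip (PySem.Chars.slice l (some 8) none)) lines.reverse st.1,
       pvLastD (fun l => PySem.Chars.startswith l "Action:".toList)
        (fun l => PySem.Chars.lower (PySem.Chars.strip (PySem.Chars.slice l (some 7) none)))
        lines.reverse st.2.1,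
       pvLastD (fun l => PySem.Chars.startswith l "Action Input:".toList)
        (fun l => PySem.Chars.strip (PySem.Chars.slice l (some 13) none)) lines.reverse st.2.2) := by
  induction lines with
  | nil => intro st; rfl
  | cons l ls ih =>
    intro st
    rw [List.foldl_cons, ih (pvStepA st l)]
    simp only [List.reverse_cons, pvLastD_append_singleton, pvStepA]
    split_ifs with h1 h2 h3 h4 h5 h6 h7 <;> first
      | rfl
      | exact absurd (pvNotBoth l "Thought:".toList "Action:".toList
          (by decide) (by decide) h1) (by simp; exact h2)
      | exact absurd (pvNotBoth l "Thought:".toList "Action Input:".toList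
          (by decide) (by decide) h1) (by simp; exact h4)
      | exact absurd (pvNotBoth l "Action:".toList "Action Input:".toList
          (by decide) (by decide) h5) (by simp; exact h6)

-- ===== VERDICT (by name: the statement is the Claim_ definition above) =====
theorem parse_react_response_spec : Claim_equal_parse_react_response := by
  intro response _
  unfold Spec_parse_react_response parse_react_response parse_react_response_alt
  rw [pvFold_eq]
  simp only [pvLastVal_eq_lastD, pvLower_lastD]
  rfl
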